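-- pv_equiv track=rewrite | github.com/openai/parameter-golf | records/track_10min_16mb/2026-03-25_Ternary_Feedback_TTT/train_gpt_mlx.py | token_chunks
-- ===== SOURCE A (Python) =====
-- def token_chunks(total_tokens, seq_len, max_chunk):
--     usable = (total_tokens // seq_len) * seq_len
--     chunk = max((max_chunk // seq_len) * seq_len, seq_len)
--     chunks = []
--     remaining = usable
--     while remaining > 0:
--         c = min(remaining, chunk)
--         chunks.append(c)
--         remaining -= c
--     return chunks
-- ===== SOURCE B (Python) =====
-- def token_chunks(total_tokens, seq_len, max_chunk):
--     usable = (total_tokens // seq_len) * seq_len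
--     chunk = max((max_chunk // seq_len) * seq_len, seq_len)
--     if usable <= 0:
--         return []
--     full, rem = divmod(usable, chunk)
--     return [chunk] * full + ([rem] if rem else [])
-- ===== Notes on version B (the rewrite author's own statement) =====
-- stated objective: simpler
-- what changed: replaces the while-loop that peels one chunk per iteration with a single closed-form divmod: full chunks by list repetition plus an optional remainder; Pre_ excludes seq_len == 0 (A raises ZeroDivisionError) and the seq_len < 0 inputs with usable > 0 and chunk <= 0, on which A's while-loop never terminates
import Mathlib
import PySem

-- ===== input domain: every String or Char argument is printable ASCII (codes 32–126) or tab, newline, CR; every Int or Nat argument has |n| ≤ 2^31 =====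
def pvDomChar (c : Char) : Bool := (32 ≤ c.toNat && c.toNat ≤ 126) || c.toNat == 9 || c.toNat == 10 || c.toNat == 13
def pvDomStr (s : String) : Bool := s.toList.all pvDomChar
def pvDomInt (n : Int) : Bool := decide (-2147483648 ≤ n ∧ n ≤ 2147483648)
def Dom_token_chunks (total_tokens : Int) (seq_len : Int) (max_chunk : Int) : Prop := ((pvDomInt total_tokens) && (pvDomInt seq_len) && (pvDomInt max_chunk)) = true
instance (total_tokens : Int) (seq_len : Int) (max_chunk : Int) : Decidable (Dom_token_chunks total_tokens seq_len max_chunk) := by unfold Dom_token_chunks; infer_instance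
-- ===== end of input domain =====

-- B replaces A's chunk-peeling while-loop by one divmod: full chunks via list replication plus an optional remainder.


-- ===== PORT A =====
-- the while-loop; fuel only makes the recursion total (inside Pre_ each step removes ≥ 1, so usable.toNat fuel is enough)
def tcLoopA (chunk : Int) : Nat → Int → List Int
  | 0, _ => []
  | fuel + 1, remaining =>
    if remaining > 0 then
      let c := min remaining chunk
      c :: tcLoopA chunk fuel (remaining - c)
    else []

def token_chunks (total_tokens : Int) (seq_len : Int) (max_chunk : Int) : List Int :=
  let usable := PySem.Int.floordiv total_tokens seq_len * seq_len
  let chunk := max (PySem.Int.floordiv max_chunk seq_len * seq_len) seq_len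
  tcLoopA chunk usable.toNat usable

-- ===== PORT B =====
def token_chunks_alt (total_tokens : Int) (seq_len : Int) (max_chunk : Int) : List Int :=
  let usable := PySem.Int.floordiv total_tokens seq_len * seq_len
  let chunk := max (PySem.Int.floordiv max_chunk seq_len * seq_len) seq_len
  if usable ≤ 0 then []
  else
    let full := PySem.Int.floordiv usable chunk
    let rem := PySem.Int.mod usable chunk
    List.replicate full.toNat chunk ++ (if rem ≠ 0 then [rem] else [])

-- ===== PRECONDITION & SPEC =====
-- Pre_ excludes exactly where A does not return: seq_len = 0 (ZeroDivisionError) and the inputs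
-- (only reachable with seq_len < 0) where usable > 0 but chunk ≤ 0, on which A's while-loop never terminates.
def Pre_token_chunks (total_tokens : Int) (seq_len : Int) (max_chunk : Int) : Prop :=
  seq_len ≠ 0 ∧
    (PySem.Int.floordiv total_tokens seq_len * seq_len ≤ 0 ∨
     0 < max (PySem.Int.floordiv max_chunk seq_len * seq_len) seq_len)
instance (total_tokens : Int) (seq_len : Int) (max_chunk : Int) : Decidable (Pre_token_chunks total_tokens seq_len max_chunk) := by unfold Pre_token_chunks; infer_instance
def pvWitness_token_chunks : Int × Int × Int := (25, 4, 10)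
def Spec_token_chunks (total_tokens : Int) (seq_len : Int) (max_chunk : Int) (out : List Int) : Prop := out = token_chunks_alt total_tokens seq_len max_chunk
instance (total_tokens : Int) (seq_len : Int) (max_chunk : Int) (out : List Int) : Decidable (Spec_token_chunks total_tokens seq_len max_chunk out) := by unfold Spec_token_chunks; infer_instance

-- ===== CLAIM (what is proved, stated in full; the proofs are below) =====
def Claim_equal_token_chunks : Prop := ∀ (total_tokens : Int) (seq_len : Int) (max_chunk : Int), Dom_token_chunks total_tokens seq_len max_chunk → Pre_token_chunks total_tokens seq_len max_chunk → Spec_token_chunks total_tokens seq_len max_chunk (token_chunks total_tokens seq_len max_chunk)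

-- ===== LEMMAS AND PROOFS =====
theorem tcLoopA_zero (chunk : Int) (fuel : Nat) : tcLoopA chunk fuel 0 = [] := by
  cases fuel <;> simp [tcLoopA]

theorem tcLoopA_closed (chunk : Int) (hc : 0 < chunk) :
    ∀ (fuel : Nat) (r : Int), 0 ≤ r → r.toNat ≤ fuel →
      tcLoopA chunk fuel r =
        List.replicate (PySem.Int.floordiv r chunk).toNat chunk ++
          (if PySem.Int.mod r chunk ≠ 0 then [PySem.Int.mod r chunk] else []) := by
  intro fuel
  induction fuel with
  | zero =>
    intro r hr hf
    have h0 : r = 0 := by omega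
    subst h0
    have hq : PySem.Int.floordiv 0 chunk = 0 := by
      rw [PySem.Int.floordiv_eq_iff_of_pos hc]; constructor <;> omega
    have hm : PySem.Int.mod 0 chunk = 0 := by
      have := PySem.Int.floordiv_mul_add_mod 0 chunk
      rw [hq] at this; omega
    simp [tcLoopA, hq, hm]
  | succ fuel ih =>
    intro r hr hf
    by_cases hpos : r > 0
    · have hq := (PySem.Int.floordiv_eq_iff_of_pos hc (a := r)
        (q := PySem.Int.floordiv r chunk)).mp rfl
      have hmeq := PySem.Int.floordiv_mul_add_mod r chunk
      by_cases hle : r ≤ chunk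
      · -- last iteration: c = r, then remaining = 0
        have hmin : min r chunk = r := by omega
        simp only [tcLoopA, if_pos hpos, hmin, sub_self, tcLoopA_zero]
        by_cases hre : r = chunk
        · have hq1 : PySem.Int.floordiv r chunk = 1 := by
            rw [PySem.Int.floordiv_eq_iff_of_pos hc]; constructor <;> omega
          have hm0 : PySem.Int.mod r chunk = 0 := by rw [hq1] at hmeq; omega
          subst hre; simp [hq1, hm0]
        · have hq0 : PySem.Int.floordiv r chunk = 0 := by
            rw [PySem.Int.floordiv_eq_iff_of_pos hc]; constructor <;> omega
          have hmr : PySem.Int.mod r chunk = r := by rw [hq0] at hmeq; omega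
          simp [hq0, hmr]; omega
      · -- c = chunk, recurse on r - chunk
        have hmin : min r chunk = chunk := by omega
        have hq' : PySem.Int.floordiv (r - chunk) chunk = PySem.Int.floordiv r chunk - 1 := by
          rw [PySem.Int.floordiv_eq_iff_of_pos hc]
          constructor <;> linarith [hq.1, hq.2]
        have hm' : PySem.Int.mod (r - chunk) chunk = PySem.Int.mod r chunk := by
          have h2 := PySem.Int.floordiv_mul_add_mod (r - chunk) chunk
          rw [hq'] at h2; linarith [hmeq, h2]
        have hq1 : 1 ≤ PySem.Int.floordiv r chunk := by
          by_contra hcon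
          have h0 : PySem.Int.floordiv r chunk ≤ 0 := by omega
          have hnp : PySem.Int.floordiv r chunk * chunk ≤ 0 := by
            have := mul_le_mul_of_nonneg_right h0 (le_of_lt hc)
            simpa using this
          linarith [hq.2]
        have hrec := ih (r - chunk) (by omega) (by omega)
        simp only [tcLoopA, if_pos hpos, hmin, hrec, hq', hm']
        have hrep : (PySem.Int.floordiv r chunk).toNat
            = ((PySem.Int.floordiv r chunk - 1).toNat) + 1 := by omega
        rw [hrep, List.replicate_succ]
        simp
    · have h0 : r = 0 := by omega
      subst h0
      have hq : PySem.Int.floordiv 0 chunk = 0 := by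
        rw [PySem.Int.floordiv_eq_iff_of_pos hc]; constructor <;> omega
      have hm : PySem.Int.mod 0 chunk = 0 := by
        have := PySem.Int.floordiv_mul_add_mod 0 chunk
        rw [hq] at this; omega
      simp [tcLoopA, hq, hm]

-- ===== VERDICT (by name: the statement is the Claim_ definition above) =====
theorem token_chunks_spec : Claim_equal_token_chunks := by
  intro tt sl mc _ hpre
  obtain ⟨hsl, hterm⟩ := hpre
  unfold Spec_token_chunks token_chunks token_chunks_alt
  set usable := PySem.Int.floordiv tt sl * sl with husable
  set chunk := max (PySem.Int.floordiv mc sl * sl) sl with hchunk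
  by_cases hu : usable ≤ 0
  · have : usable.toNat = 0 := by omega
    simp [this, tcLoopA, hu]
  · have hupos : 0 < usable := by omega
    have hcpos : 0 < chunk := by
      rcases hterm with h | h
      · omega
      · exact h
    rw [tcLoopA_closed chunk hcpos usable.toNat usable (by omega) (le_refl _)]
    simp [hu]
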